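-- pv_equiv track=rewrite | github.com/niksyromyatnikov/opnu-ml-assignments | part-of-speech-tagging-with-hmm/pos_helper.py | resolve_unknown
-- ===== SOURCE A (Python) =====
-- import string
--
-- punct = set(string.punctuation)
--
-- nn_suffix = ["action", "age", "ance", "cy", "dom", "ee", "ence", "er", "hood", "ion", "ism", "ist", "ity", "ling", "ment", "ness", "or", "ry", "scape", "ship", "ty"]
--
-- vb_suffix = ["ate", "ify", "ise", "ize"]
--
-- adj_suffix = ["able", "ese", "ful", "i", "ian", "ible", "ic", "ish", "ive", "less", "ly", "ous"]
--
-- adv_suffix = ["ward", "wards", "wise"]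
--
-- def resolve_unknown(tok: str) -> str:
--     """Ідентифікація невідомих слів"""
--     # Цифри
--     if any(char.isdigit() for char in tok):
--         return "--unk_digit--"
--
--     # Пунктуація
--     elif any(char in punct for char in tok):
--         return "--unk_punct--"
--
--     # Верхній регістр
--     elif any(char.isupper() for char in tok):
--         return "--unk_upper--"
--
--     # Іменники
--     elif any(tok.endswith(suffix) for suffix in nn_suffix):
--         return "--unk_noun--"
--
--     # Дієслова
--     elif any(tok.endswith(suffix) for suffix in vb_suffix):
--         return "--unk_verb--"
--
--     # Прикметники
--     elif any(tok.endswith(suffix) for suffix in adj_suffix):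
--         return "--unk_adj--"
--
--     # Прислівники
--     elif any(tok.endswith(suffix) for suffix in adv_suffix):
--         return "--unk_adv--"
--
--     return "--unk--"
-- ===== SOURCE B (Python) =====
-- import string
--
-- nn_suffix = ["action", "age", "ance", "cy", "dom", "ee", "ence", "er", "hood", "ion", "ism", "ist", "ity", "ling", "ment", "ness", "or", "ry", "scape", "ship", "ty"]
-- vb_suffix = ["ate", "ify", "ise", "ize"]
-- adj_suffix = ["able", "ese", "ful", "i", "ian", "ible", "ic", "ish", "ive", "less", "ly", "ous"]
-- adv_suffix = ["ward", "wards", "wise"]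
--
-- # priority encoded as a numeric rank: 0 digit < 1 punct < 2 upper < 3 noun < 4 verb < 5 adj < 6 adv < 7 none
-- _char_rank = {}
-- for c in string.ascii_uppercase:
--     _char_rank[c] = 2
-- for c in string.punctuation:
--     _char_rank[c] = 1
-- for c in string.digits:
--     _char_rank[c] = 0
--
-- _suffix_rank = {}
-- for group, r in ((nn_suffix, 3), (vb_suffix, 4), (adj_suffix, 5), (adv_suffix, 6)):
--     for s in group:
--         _suffix_rank[s] = r
--
-- _labels = {0: "--unk_digit--", 1: "--unk_punct--", 2: "--unk_upper--",
--            3: "--unk_noun--", 4: "--unk_verb--", 5: "--unk_adj--", 6: "--unk_adv--"}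
--
-- def resolve_unknown(tok: str) -> str:
--     rank = 7
--     for c in tok:
--         rank = min(rank, _char_rank.get(c, 7))
--     for k in range(1, min(6, len(tok)) + 1):
--         rank = min(rank, _suffix_rank.get(tok[-k:], 7))
--     return _labels.get(rank, "--unk--")
-- ===== Notes on version B (the rewrite author's own statement) =====
-- stated objective: alternative
-- what changed: B replaces A's staged boolean scans (three any(char-class) passes, then four any(endswith) scans over 40 suffixes) by a single numeric min-reduction: the priority order is encoded as integer ranks (0 digit < 1 punct < 2 upper < 3 noun < 4 verb < 5 adj < 6 adv < 7 none), each character's rank comes from one precomputed dict, suffix categories are resolved by at most six O(1) dict lookups of the token's last-k slices instead of 40 endswith comparisons, and the answer is the label of the minimum rank seen, with no branching.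
import Mathlib
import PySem

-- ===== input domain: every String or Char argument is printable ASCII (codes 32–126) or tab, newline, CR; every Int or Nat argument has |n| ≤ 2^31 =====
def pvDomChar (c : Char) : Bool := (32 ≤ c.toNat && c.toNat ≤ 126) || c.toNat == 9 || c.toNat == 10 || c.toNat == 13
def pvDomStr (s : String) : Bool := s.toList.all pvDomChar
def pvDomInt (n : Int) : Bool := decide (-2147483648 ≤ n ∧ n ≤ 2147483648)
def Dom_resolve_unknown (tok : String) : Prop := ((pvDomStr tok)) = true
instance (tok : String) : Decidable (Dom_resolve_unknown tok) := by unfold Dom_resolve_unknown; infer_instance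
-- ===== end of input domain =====

set_option maxRecDepth 100000


-- B replaces A's staged any()/endswith scans by a single numeric min-reduction: the priority order is
-- encoded as ranks (0 digit < 1 punct < 2 upper < 3 noun < 4 verb < 5 adj < 6 adv < 7 none), char ranks
-- come from a precomputed dict and suffix ranks from dict lookups of the token's last-k slices (objective: alternative).

-- shared module-level constants
def punctStr : String := "!\"#$%&'()*+,-./:;<=>?@[\\]^_`{|}~"
def punct : List Char := PySem.Set.ofList punctStr.toList

def nn_suffix : List String := ["action", "age", "ance", "cy", "dom", "ee", "ence", "er", "hood", "ion", "ism", "ist", "ity", "ling", "ment", "ness", "or", "ry", "scape", "ship", "ty"]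
def vb_suffix : List String := ["ate", "ify", "ise", "ize"]
def adj_suffix : List String := ["able", "ese", "ful", "i", "ian", "ible", "ic", "ish", "ive", "less", "ly", "ous"]
def adv_suffix : List String := ["ward", "wards", "wise"]

-- ===== PORT A =====
def resolve_unknown (tok : String) : String :=
  if tok.toList.any (fun c => PySem.Chars.isdigit c) then "--unk_digit--"
  else if tok.toList.any (fun c => punct.contains c) then "--unk_punct--"
  else if tok.toList.any (fun c => PySem.Chars.isupper c) then "--unk_upper--"
  else if nn_suffix.any (fun s => PySem.Str.endswith tok s) then "--unk_noun--"
  else if vb_suffix.any (fun s => PySem.Str.endswith tok s) then "--unk_verb--"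
  else if adj_suffix.any (fun s => PySem.Str.endswith tok s) then "--unk_adj--"
  else if adv_suffix.any (fun s => PySem.Str.endswith tok s) then "--unk_adv--"
  else "--unk--"

-- ===== PORT B =====
-- Source B's module-level dict-building loops
def char_rank : PySem.Dict Char Int :=
  let d := "ABCDEFGHIJKLMNOPQRSTUVWXYZ".toList.foldl (fun d c => d.insert c 2) PySem.Dict.empty
  let d := punctStr.toList.foldl (fun d c => d.insert c 1) d
  "0123456789".toList.foldl (fun d c => d.insert c 0) d

def suffix_rank : PySem.Dict (List Char) Int :=
  [(nn_suffix, (3 : Int)), (vb_suffix, 4), (adj_suffix, 5), (adv_suffix, 6)].foldl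
    (fun d gr => gr.1.foldl (fun d s => d.insert s.toList gr.2) d) PySem.Dict.empty

def labels : PySem.Dict Int String :=
  PySem.Dict.ofList [(0, "--unk_digit--"), (1, "--unk_punct--"), (2, "--unk_upper--"),
                     (3, "--unk_noun--"), (4, "--unk_verb--"), (5, "--unk_adj--"), (6, "--unk_adv--")]

def resolve_unknown_alt (tok : String) : String :=
  let l := tok.toList
  let rank : Int := l.foldl (fun r c => min r (char_rank.getD c 7)) 7
  let rank2 : Int := (PySem.List.pyRange 1 (min 6 (l.length : Int) + 1) 1).foldl
      (fun r k => min r (suffix_rank.getD (PySem.List.slice l (some (-k)) none) 7)) rank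
  labels.getD rank2 "--unk--"

-- ===== PRECONDITION & SPEC =====
def Spec_resolve_unknown (tok : String) (out : String) : Prop := out = resolve_unknown_alt tok
instance (tok : String) (out : String) : Decidable (Spec_resolve_unknown tok out) := by unfold Spec_resolve_unknown; infer_instance

-- ===== CLAIM (what is proved, stated in full; the proofs are below) =====
def Claim_equal_resolve_unknown : Prop := ∀ (tok : String), Dom_resolve_unknown tok → Spec_resolve_unknown tok (resolve_unknown tok)

-- ===== LEMMAS AND PROOFS =====

-- proof-side names for the two chains A computes
def crOf (c : Char) : Int :=
  if PySem.Chars.isdigit c then 0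
  else if punct.contains c then 1
  else if PySem.Chars.isupper c then 2
  else 7

def crankOf (l : List Char) : Int :=
  if l.any (fun c => PySem.Chars.isdigit c) then 0
  else if l.any (fun c => punct.contains c) then 1
  else if l.any (fun c => PySem.Chars.isupper c) then 2
  else 7

def srankOf (l : List Char) : Int :=
  if nn_suffix.any (fun s => PySem.Chars.endswith l s.toList) then 3
  else if vb_suffix.any (fun s => PySem.Chars.endswith l s.toList) then 4
  else if adj_suffix.any (fun s => PySem.Chars.endswith l s.toList) then 5
  else if adv_suffix.any (fun s => PySem.Chars.endswith l s.toList) then 6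
  else 7

-- generic min-fold facts
theorem foldl_min_min {α : Type} (f : α → Int) (ks : List α) (a b : Int) :
    ks.foldl (fun r k => min r (f k)) (min a b) = min a (ks.foldl (fun r k => min r (f k)) b) := by
  induction ks generalizing b with
  | nil => rfl
  | cons k ks ih => simp only [List.foldl_cons]; rw [min_assoc, ih]

theorem foldl_min_le_init {α : Type} (f : α → Int) (ks : List α) (a : Int) :
    ks.foldl (fun r k => min r (f k)) a ≤ a := by
  induction ks generalizing a with
  | nil => exact le_refl a
  | cons k ks ih => exact le_trans (ih (min a (f k))) (min_le_left _ _)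

theorem foldl_min_le_elem {α : Type} (f : α → Int) (ks : List α) (a : Int) {k : α} (hk : k ∈ ks) :
    ks.foldl (fun r k => min r (f k)) a ≤ f k := by
  induction ks generalizing a with
  | nil => cases hk
  | cons k' ks ih =>
    rcases List.mem_cons.mp hk with h | h
    · subst h
      exact le_trans (foldl_min_le_init f ks (min a (f k))) (min_le_right _ _)
    · exact ih _ h

theorem foldl_min_attained {α : Type} (f : α → Int) (ks : List α) (a : Int) :
    ks.foldl (fun r k => min r (f k)) a = a ∨ ∃ k ∈ ks, ks.foldl (fun r k => min r (f k)) a = f k := by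
  induction ks generalizing a with
  | nil => exact Or.inl rfl
  | cons k ks ih =>
    simp only [List.foldl_cons]
    rcases ih (min a (f k)) with h | ⟨k', hk', h⟩
    · rcases min_choice a (f k) with hm | hm
      · exact Or.inl (h.trans hm)
      · exact Or.inr ⟨k, List.mem_cons_self, h.trans hm⟩
    · exact Or.inr ⟨k', List.mem_cons_of_mem _ hk', h⟩

-- the char-rank dict agrees with A's per-character classification chain (checked on all ASCII codes)
theorem cr_fin : ∀ n : Fin 128, char_rank.getD (Char.ofNat n.val) 7 = crOf (Char.ofNat n.val) := by decide

theorem cr_getD (c : Char) (hc : pvDomChar c = true) : char_rank.getD c 7 = crOf c := by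
  have h : c.toNat < 128 := by simp [pvDomChar] at hc; omega
  have := cr_fin ⟨c.toNat, h⟩
  simpa [Char.ofNat_toNat] using this

theorem cr_min_crank (c : Char) (l : List Char) : min (crOf c) (crankOf l) = crankOf (c :: l) := by
  unfold crOf crankOf
  cases hd : PySem.Chars.isdigit c <;> cases hp : punct.contains c <;>
    cases hu : PySem.Chars.isupper c <;>
    simp only [List.any_cons, hd, hp, hu, Bool.true_or, Bool.false_or, if_true, if_false,
      Bool.false_eq_true] <;>
    split_ifs <;> omega

theorem fold_char (l : List Char) (h : ∀ c ∈ l, pvDomChar c = true) :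
    l.foldl (fun r c => min r (char_rank.getD c 7)) 7 = crankOf l := by
  induction l with
  | nil => rfl
  | cons c l ih =>
    simp only [List.foldl_cons]
    rw [cr_getD c (h c List.mem_cons_self), min_comm, foldl_min_min,
        ih (fun c hc => h c (List.mem_cons_of_mem _ hc)), cr_min_crank]

-- getD on a literal dict: generic value facts via find?
theorem getD_mem_of_ne {ν : Type} (ps : List (List Char × ν)) (x : List Char) (d0 : ν)
    (h : (PySem.Dict.mk ps).getD x d0 ≠ d0) : (x, (PySem.Dict.mk ps).getD x d0) ∈ ps := by
  have hget : (PySem.Dict.mk ps).getD x d0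
      = ((ps.find? (fun p => p.1 == x)).map (·.2)).getD d0 := rfl
  rw [hget] at h ⊢
  cases hf : ps.find? (fun p => p.1 == x) with
  | none => rw [hf] at h; exact absurd rfl h
  | some p =>
    have hmem := List.mem_of_find?_eq_some hf
    have heq : p.1 = x := by simpa using List.find?_some hf
    simp only [Option.map_some, Option.getD_some]
    rw [← heq]
    simpa using hmem

theorem suffix_items :
    suffix_rank.items = nn_suffix.map (fun s => (s.toList, (3 : Int)))
      ++ vb_suffix.map (fun s => (s.toList, 4)) ++ adj_suffix.map (fun s => (s.toList, 5))
      ++ adv_suffix.map (fun s => (s.toList, 6)) := by decide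

theorem getD_cases (x : List Char) (h7 : suffix_rank.getD x 7 ≠ 7) :
    (suffix_rank.getD x 7 = 3 ∧ x ∈ nn_suffix.map String.toList)
    ∨ (suffix_rank.getD x 7 = 4 ∧ x ∈ vb_suffix.map String.toList)
    ∨ (suffix_rank.getD x 7 = 5 ∧ x ∈ adj_suffix.map String.toList)
    ∨ (suffix_rank.getD x 7 = 6 ∧ x ∈ adv_suffix.map String.toList) := by
  have hm := getD_mem_of_ne suffix_rank.items x 7 h7
  rw [show PySem.Dict.mk suffix_rank.items = suffix_rank from rfl, suffix_items] at hm
  simp only [List.mem_append, List.mem_map, Prod.mk.injEq] at hm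
  rcases hm with ((⟨s, hs, hx, hv⟩ | ⟨s, hs, hx, hv⟩) | ⟨s, hs, hx, hv⟩) | ⟨s, hs, hx, hv⟩
  · exact Or.inl ⟨hv.symm, List.mem_map.mpr ⟨s, hs, hx⟩⟩
  · exact Or.inr (Or.inl ⟨hv.symm, List.mem_map.mpr ⟨s, hs, hx⟩⟩)
  · exact Or.inr (Or.inr (Or.inl ⟨hv.symm, List.mem_map.mpr ⟨s, hs, hx⟩⟩))
  · exact Or.inr (Or.inr (Or.inr ⟨hv.symm, List.mem_map.mpr ⟨s, hs, hx⟩⟩))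

-- per-group getD values and suffix lengths (finite checks)
theorem sfx_nn : ∀ s ∈ nn_suffix, suffix_rank.getD s.toList 7 = 3 ∧ 1 ≤ s.toList.length ∧ s.toList.length ≤ 6 := by decide
theorem sfx_vb : ∀ s ∈ vb_suffix, suffix_rank.getD s.toList 7 = 4 ∧ 1 ≤ s.toList.length ∧ s.toList.length ≤ 6 := by decide
theorem sfx_adj : ∀ s ∈ adj_suffix, suffix_rank.getD s.toList 7 = 5 ∧ 1 ≤ s.toList.length ∧ s.toList.length ≤ 6 := by decide
theorem sfx_adv : ∀ s ∈ adv_suffix, suffix_rank.getD s.toList 7 = 6 ∧ 1 ≤ s.toList.length ∧ s.toList.length ≤ 6 := by decide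

theorem drop_of_suffix (x l : List Char) (h : x <:+ l) : l.drop (l.length - x.length) = x := by
  obtain ⟨t, rfl⟩ := h
  have : (t ++ x).length - x.length = t.length := by simp
  rw [this, List.drop_left]

-- if some suffix of a group matches, the min-fold is ≤ that group's rank
theorem fold_le_of_group (l : List Char) (group : List String) (v : Int)
    (hg : ∀ s ∈ group, suffix_rank.getD s.toList 7 = v ∧ 1 ≤ s.toList.length ∧ s.toList.length ≤ 6)
    (hany : group.any (fun s => PySem.Chars.endswith l s.toList) = true) :
    (PySem.List.pyRange 1 (min 6 (l.length : Int) + 1) 1).foldl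
      (fun r k => min r (suffix_rank.getD (PySem.List.slice l (some (-k)) none) 7)) 7 ≤ v := by
  obtain ⟨s, hs, hend⟩ := List.any_eq_true.mp hany
  obtain ⟨hval, hlen1, hlen6⟩ := hg s hs
  have hsuf : s.toList <:+ l := (PySem.Chars.endswith_iff l s.toList).mp hend
  have hle : s.toList.length ≤ l.length := hsuf.length_le
  have hk : ((s.toList.length : Int)) ∈ PySem.List.pyRange 1 (min 6 (l.length : Int) + 1) 1 := by
    rw [PySem.List.mem_pyRange_one]
    constructor
    · exact_mod_cast hlen1
    · have : (s.toList.length : Int) ≤ min 6 (l.length : Int) := by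
        apply le_min
        · exact_mod_cast hlen6
        · exact_mod_cast hle
      omega
  have hgv : suffix_rank.getD (PySem.List.slice l (some (-((s.toList.length : Nat) : Int))) none) 7 = v := by
    rw [PySem.List.slice_from_neg_natCast l s.toList.length (by omega),
        drop_of_suffix _ _ hsuf, hval]
  have hle2 := foldl_min_le_elem
    (fun k => suffix_rank.getD (PySem.List.slice l (some (-k)) none) 7)
    (PySem.List.pyRange 1 (min 6 (l.length : Int) + 1) 1) 7 hk
  beta_reduce at hle2
  rwa [hgv] at hle2

theorem srank_le7 (l : List Char) : 3 ≤ srankOf l ∧ srankOf l ≤ 7 := by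
  unfold srankOf; split_ifs <;> omega

theorem srank_le_nn (l : List Char) (h : nn_suffix.any (fun s => PySem.Chars.endswith l s.toList) = true) : srankOf l ≤ 3 := by
  unfold srankOf; split_ifs <;> simp_all
theorem srank_le_vb (l : List Char) (h : vb_suffix.any (fun s => PySem.Chars.endswith l s.toList) = true) : srankOf l ≤ 4 := by
  unfold srankOf; split_ifs <;> simp_all
theorem srank_le_adj (l : List Char) (h : adj_suffix.any (fun s => PySem.Chars.endswith l s.toList) = true) : srankOf l ≤ 5 := by
  unfold srankOf; split_ifs <;> simp_all
theorem srank_le_adv (l : List Char) (h : adv_suffix.any (fun s => PySem.Chars.endswith l s.toList) = true) : srankOf l ≤ 6 := by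
  unfold srankOf; split_ifs <;> simp_all

theorem fold_suffix (l : List Char) :
    (PySem.List.pyRange 1 (min 6 (l.length : Int) + 1) 1).foldl
      (fun r k => min r (suffix_rank.getD (PySem.List.slice l (some (-k)) none) 7)) 7 = srankOf l := by
  set ks := PySem.List.pyRange 1 (min 6 (l.length : Int) + 1) 1 with hks
  set g := fun k => suffix_rank.getD (PySem.List.slice l (some (-k)) none) 7 with hg
  apply le_antisymm
  · -- fold ≤ srankOf l
    unfold srankOf
    split_ifs with h1 h2 h3 h4
    · exact fold_le_of_group l nn_suffix 3 sfx_nn h1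
    · exact fold_le_of_group l vb_suffix 4 sfx_vb h2
    · exact fold_le_of_group l adj_suffix 5 sfx_adj h3
    · exact fold_le_of_group l adv_suffix 6 sfx_adv h4
    · exact foldl_min_le_init g ks 7
  · -- srankOf l ≤ fold
    rcases foldl_min_attained g ks 7 with h | ⟨k, hk, h⟩
    · rw [h]; exact (srank_le7 l).2
    · rw [h]
      by_cases h7 : g k = 7
      · rw [h7]; exact (srank_le7 l).2
      · have hkr := PySem.List.mem_pyRange_one.mp (hks ▸ hk)
        have hkn : k = ((k.toNat : Nat) : Int) := by omega
        have hslice : PySem.List.slice l (some (-k)) none = l.drop (l.length - k.toNat) := by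
          rw [hkn]; exact PySem.List.slice_from_neg_natCast l k.toNat (by omega)
        have hsuf : PySem.List.slice l (some (-k)) none <:+ l := by
          rw [hslice]; exact List.drop_suffix _ _
        have h7' : suffix_rank.getD (PySem.List.slice l (some (-k)) none) 7 ≠ 7 := h7
        have hany : ∀ (group : List String),
            PySem.List.slice l (some (-k)) none ∈ group.map String.toList →
            group.any (fun s => PySem.Chars.endswith l s.toList) = true := by
          intro group hmem
          obtain ⟨s, hs, hsx⟩ := List.mem_map.mp hmem
          exact List.any_eq_true.mpr ⟨s, hs, (PySem.Chars.endswith_iff _ _).mpr (hsx ▸ hsuf)⟩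
        rcases getD_cases _ h7' with ⟨hv, hmem⟩ | ⟨hv, hmem⟩ | ⟨hv, hmem⟩ | ⟨hv, hmem⟩ <;>
          rw [show g k = suffix_rank.getD (PySem.List.slice l (some (-k)) none) 7 from rfl, hv]
        · exact srank_le_nn l (hany _ hmem)
        · exact srank_le_vb l (hany _ hmem)
        · exact srank_le_adj l (hany _ hmem)
        · exact srank_le_adv l (hany _ hmem)

theorem crank_le7 (l : List Char) : crankOf l ≤ 7 := by
  unfold crankOf; split_ifs <;> omega

-- B in normal form
theorem B_normal (tok : String) (h : ∀ c ∈ tok.toList, pvDomChar c = true) :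
    resolve_unknown_alt tok = labels.getD (min (crankOf tok.toList) (srankOf tok.toList)) "--unk--" := by
  simp only [resolve_unknown_alt]
  rw [fold_char tok.toList h]
  have hm : crankOf tok.toList = min (crankOf tok.toList) 7 := (min_eq_left (crank_le7 _)).symm
  have h2 : (PySem.List.pyRange 1 (min 6 (tok.toList.length : Int) + 1) 1).foldl
      (fun r k => min r (suffix_rank.getD (PySem.List.slice tok.toList (some (-k)) none) 7))
      (crankOf tok.toList) = min (crankOf tok.toList) (srankOf tok.toList) := by
    conv_lhs => rw [hm]
    rw [foldl_min_min, fold_suffix]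
  rw [h2]

-- A in the same normal form
theorem A_normal (tok : String) :
    resolve_unknown tok = labels.getD (min (crankOf tok.toList) (srankOf tok.toList)) "--unk--" := by
  unfold resolve_unknown crankOf srankOf
  simp only [PySem.Str.endswith_eq]
  split_ifs <;> decide

-- ===== VERDICT (by name: the statement is the Claim_ definition above) =====
theorem resolve_unknown_spec : Claim_equal_resolve_unknown := by
  intro tok hdom
  unfold Spec_resolve_unknown
  have h : ∀ c ∈ tok.toList, pvDomChar c = true := by
    have := hdom
    unfold Dom_resolve_unknown pvDomStr at this
    exact fun c hc => List.all_eq_true.mp this c hc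
  rw [B_normal tok h, A_normal tok]
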